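-- pv_equiv track=rewrite | github.com/arrowlimo/arrow-limo | modern_backend/app/routers/receipts_simple.py | determine_receipt_type
-- ===== SOURCE A (Python) =====
-- def determine_receipt_type(desc: str, trans_type: str) -> tuple[str, str]:
--     """Determine receipt_type and notes from banking description and transaction type
--
--     Args:
--         desc: Banking transaction description
--         trans_type: 'DEBIT' or 'CREDIT'
--
--     Returns:
--         tuple of (receipt_type, notes)
--     """
--     desc_upper = desc.upper() if desc else ""
--
--     if trans_type == 'CREDIT':
--         # Money coming IN - categorize reversals/refunds
--         if 'NSF RETURN' in desc_upper or 'NSF CHECK' in desc_upper or 'RETURNED ITEM' in desc_upper: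
--             return ('NSF_REVERSAL', 'NSF reversal - payment bounced and returned')
--         elif 'CORRECT' in desc_upper:
--             return ('CORRECTION', 'Bank correction - transaction reversed')
--         elif any(kw in desc_upper for kw in ['REFUND', 'REVERSAL', 'STOP', 'CANCEL']):
--             return ('REFUND', 'Refund or reversal')
--         else:
--             return ('REFUND', 'Credit transaction - reducing expenses')
--     else:
--         # Money going OUT - categorize expenses/fees
--         if any(kw in desc_upper for kw in ['NSF CHARGE', 'NSF FEE', 'SERVICE CHARGE', 'MONTHLY FEE']):
--             return ('BANK_CHARGE', 'Bank fee or NSF charge')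
--         else:
--             return ('EXPENSE', '')  # Normal expense
-- ===== SOURCE B (Python) =====
-- def _tables(branch):
--     """Per-branch (keyword -> priority) list and result table indexed by priority.
--
--     The last result entry is the default (priority = len(results) - 1)."""
--     if branch == 'CREDIT':
--         return (
--             [('NSF RETURN', 0), ('NSF CHECK', 0), ('RETURNED ITEM', 0),
--              ('CORRECT', 1),
--              ('REFUND', 2), ('REVERSAL', 2), ('STOP', 2), ('CANCEL', 2)],
--             [('NSF_REVERSAL', 'NSF reversal - payment bounced and returned'),
--              ('CORRECTION', 'Bank correction - transaction reversed'),
--              ('REFUND', 'Refund or reversal'),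
--              ('REFUND', 'Credit transaction - reducing expenses')],
--         )
--     return (
--         [('NSF CHARGE', 0), ('NSF FEE', 0), ('SERVICE CHARGE', 0), ('MONTHLY FEE', 0)],
--         [('BANK_CHARGE', 'Bank fee or NSF charge'),
--          ('EXPENSE', '')],
--     )
--
--
-- def determine_receipt_type(desc: str, trans_type: str) -> tuple[str, str]:
--     u = desc.upper() if desc else ""
--     keywords, results = _tables('CREDIT' if trans_type == 'CREDIT' else 'DEBIT')
--     best = min((p for kw, p in keywords if kw in u), default=len(results) - 1)
--     return results[best]
-- ===== Notes on version B (the rewrite author's own statement) =====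
-- stated objective: alternative
-- what changed: Replaces the ordered first-match if/elif ladder by an aggregate-then-index scheme: every keyword carries a numeric priority, B collects the priorities of ALL matching keywords (full unordered scan, no early return), takes the minimum, and indexes a result table where the last entry is the default.
import Mathlib
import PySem

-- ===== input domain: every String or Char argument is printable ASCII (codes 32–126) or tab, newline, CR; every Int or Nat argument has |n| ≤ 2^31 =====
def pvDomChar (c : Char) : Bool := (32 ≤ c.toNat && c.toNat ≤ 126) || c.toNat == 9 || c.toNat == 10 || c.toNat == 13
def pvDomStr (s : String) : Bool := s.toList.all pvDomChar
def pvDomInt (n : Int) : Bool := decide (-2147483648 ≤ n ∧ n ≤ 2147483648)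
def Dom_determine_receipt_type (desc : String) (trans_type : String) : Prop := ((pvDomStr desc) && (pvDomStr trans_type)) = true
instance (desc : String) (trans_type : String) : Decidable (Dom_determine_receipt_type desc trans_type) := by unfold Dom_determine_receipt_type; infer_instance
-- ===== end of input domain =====

-- B replaces A's ordered if/elif ladder by aggregate-then-index: collect the priorities of ALL matching keywords, take the minimum, index a result table (default = last entry); same cost.

-- ===== PORT A =====
def determine_receipt_type (desc : String) (trans_type : String) : String × String :=
  let desc_upper := if desc ≠ "" then PySem.Str.upper desc else ""
  if trans_type = "CREDIT" then
    if PySem.Str.isIn "NSF RETURN" desc_upper || PySem.Str.isIn "NSF CHECK" desc_upper || PySem.Str.isIn "RETURNED ITEM" desc_upper then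
      ("NSF_REVERSAL", "NSF reversal - payment bounced and returned")
    else if PySem.Str.isIn "CORRECT" desc_upper then
      ("CORRECTION", "Bank correction - transaction reversed")
    else if ["REFUND", "REVERSAL", "STOP", "CANCEL"].any (fun kw => PySem.Str.isIn kw desc_upper) then
      ("REFUND", "Refund or reversal")
    else
      ("REFUND", "Credit transaction - reducing expenses")
  else
    if ["NSF CHARGE", "NSF FEE", "SERVICE CHARGE", "MONTHLY FEE"].any (fun kw => PySem.Str.isIn kw desc_upper) then
      ("BANK_CHARGE", "Bank fee or NSF charge")
    else
      ("EXPENSE", "")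

-- ===== PORT B =====
-- per-branch (keyword, priority) list and result table indexed by priority; last result entry is the default
def pvTables (branch : String) : List (String × Nat) × List (String × String) :=
  if branch = "CREDIT" then
    ([("NSF RETURN", 0), ("NSF CHECK", 0), ("RETURNED ITEM", 0),
      ("CORRECT", 1),
      ("REFUND", 2), ("REVERSAL", 2), ("STOP", 2), ("CANCEL", 2)],
     [("NSF_REVERSAL", "NSF reversal - payment bounced and returned"),
      ("CORRECTION", "Bank correction - transaction reversed"),
      ("REFUND", "Refund or reversal"),
      ("REFUND", "Credit transaction - reducing expenses")])
  else
    ([("NSF CHARGE", 0), ("NSF FEE", 0), ("SERVICE CHARGE", 0), ("MONTHLY FEE", 0)],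
     [("BANK_CHARGE", "Bank fee or NSF charge"),
      ("EXPENSE", "")])

-- Python's min(gen, default=d): d when the generator is empty, else the minimum
def pvMinD (d : Nat) : List Nat → Nat
  | [] => d
  | x :: xs => xs.foldl min x

def determine_receipt_type_alt (desc : String) (trans_type : String) : String × String :=
  let u := if desc ≠ "" then PySem.Str.upper desc else ""
  let t := pvTables (if trans_type = "CREDIT" then "CREDIT" else "DEBIT")
  let matched := t.1.filterMap (fun kp => if PySem.Str.isIn kp.1 u then some kp.2 else none)
  let best := pvMinD (t.2.length - 1) matched
  t.2.getD best ("", "")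

-- ===== PRECONDITION & SPEC =====
def Spec_determine_receipt_type (desc : String) (trans_type : String) (out : String × String) : Prop := out = determine_receipt_type_alt desc trans_type
instance (desc : String) (trans_type : String) (out : String × String) : Decidable (Spec_determine_receipt_type desc trans_type out) := by unfold Spec_determine_receipt_type; infer_instance

-- ===== CLAIM =====
def Claim_equal_determine_receipt_type : Prop := ∀ (desc : String) (trans_type : String), Dom_determine_receipt_type desc trans_type → Spec_determine_receipt_type desc trans_type (determine_receipt_type desc trans_type)

-- ===== LEMMAS AND PROOFS =====

-- ===== VERDICT =====
theorem determine_receipt_type_spec : Claim_equal_determine_receipt_type := by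
  intro desc trans_type _
  unfold Spec_determine_receipt_type determine_receipt_type determine_receipt_type_alt pvTables
  by_cases ht : trans_type = "CREDIT"
  · simp only [ht, if_true, List.any_cons, List.any_nil, Bool.or_false,
      List.filterMap_cons, List.filterMap_nil]
    generalize (if desc ≠ "" then PySem.Str.upper desc else "") = u
    generalize PySem.Str.isIn "NSF RETURN" u = b1
    generalize PySem.Str.isIn "NSF CHECK" u = b2
    generalize PySem.Str.isIn "RETURNED ITEM" u = b3
    generalize PySem.Str.isIn "CORRECT" u = b4
    generalize PySem.Str.isIn "REFUND" u = b5
    generalize PySem.Str.isIn "REVERSAL" u = b6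
    generalize PySem.Str.isIn "STOP" u = b7
    generalize PySem.Str.isIn "CANCEL" u = b8
    cases b1 <;> cases b2 <;> cases b3 <;> cases b4 <;> cases b5 <;> cases b6 <;>
      cases b7 <;> cases b8 <;> rfl
  · simp only [ht, if_false, List.any_cons, List.any_nil, Bool.or_false,
      List.filterMap_cons, List.filterMap_nil, String.reduceEq]
    generalize (if desc ≠ "" then PySem.Str.upper desc else "") = u
    generalize PySem.Str.isIn "NSF CHARGE" u = c1
    generalize PySem.Str.isIn "NSF FEE" u = c2
    generalize PySem.Str.isIn "SERVICE CHARGE" u = c3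
    generalize PySem.Str.isIn "MONTHLY FEE" u = c4
    cases c1 <;> cases c2 <;> cases c3 <;> cases c4 <;> rfl
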